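-- pv_equiv track=rewrite | github.com/guilhermedlroncato/python_coursera | parte2/exercicios/semana_6/elefantes.py | elefantes
-- ===== SOURCE A (Python) =====
-- def elefantes(n, ini = 1):
--     elefante = ''
--     if n < 1:
--         return ''
--     else:
--         if ini == 1:
--             elefante = 'Um elefante '+ incomodam(ini) + 'muita gente\n'
--             elefante = elefante + elefantes(n - 1, ini + 1)
--         else:
--             elefante = elefante + f'{ini} elefantes {incomodam(ini)}muito mais\n'
--             elefante = elefante + f'{ini} elefantes incomodam muita gente\n'
--             elefante = elefante + elefantes(n -1, ini + 1)
--
--     return elefante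
--
-- def incomodam(n, ini = 1):
--     if n < 1:
--         return ''
--     else:
--         if ini == 1 and n == 1:
--             frase = 'incomoda ' + incomodam(n - 1, ini + 1)
--         else:
--             frase = 'incomodam ' + incomodam(n - 1, ini + 1)
--
--     return frase
-- ===== SOURCE B (Python) =====
-- def elefantes(n, ini=1):
--     if n < 1:
--         return ''
--     parts = []
--     for i in range(ini, ini + n):
--         if i == 1:
--             parts.append('Um elefante incomoda muita gente\n')
--         else:
--             parts.append(f'{i} elefantes ' + 'incomodam ' * i + 'muito mais\n')
--             parts.append(f'{i} elefantes incomodam muita gente\n')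
--     return ''.join(parts)
-- ===== Notes on version B (the rewrite author's own statement) =====
-- stated objective: simpler
-- what changed: Replaced the double recursion (elefantes recursing on n plus the recursive incomodam helper) by a single iterative loop over range(ini, ini+n) appending line strings to a list ('incomodam '*i as the closed form of the helper) with one final ''.join, which avoids re-copying the growing result at every recursion level.
import Mathlib
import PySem

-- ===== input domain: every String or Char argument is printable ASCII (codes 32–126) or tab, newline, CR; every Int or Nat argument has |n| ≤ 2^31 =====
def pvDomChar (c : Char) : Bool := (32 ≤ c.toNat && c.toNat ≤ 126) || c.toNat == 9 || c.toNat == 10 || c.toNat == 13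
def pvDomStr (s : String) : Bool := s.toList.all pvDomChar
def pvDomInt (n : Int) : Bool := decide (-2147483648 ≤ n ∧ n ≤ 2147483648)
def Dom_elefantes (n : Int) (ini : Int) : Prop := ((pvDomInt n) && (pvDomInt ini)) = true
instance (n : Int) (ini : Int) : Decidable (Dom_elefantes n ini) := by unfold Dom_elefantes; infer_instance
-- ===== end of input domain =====

-- ===== PORT A =====
-- B replaces A's double recursion by one iterative loop + join (objective: simpler). A is total; A = B everywhere on Dom.
-- helper incomodam(n, ini=1) of A, recursion on n (fuel = n.toNat)
def incomodamA (n : Int) (ini : Int) : String :=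
  if n < 1 then ""
  else if ini == 1 && n == 1 then "incomoda " ++ incomodamA (n - 1) (ini + 1)
  else "incomodam " ++ incomodamA (n - 1) (ini + 1)
termination_by n.toNat
decreasing_by all_goals omega

def elefantes (n : Int) (ini : Int) : String :=
  if n < 1 then ""
  else if ini == 1 then
    ("Um elefante " ++ incomodamA ini 1 ++ "muita gente\n") ++ elefantes (n - 1) (ini + 1)
  else
    ((("" ++ (PySem.Int.toStr ini ++ " elefantes " ++ incomodamA ini 1 ++ "muito mais\n"))
        ++ (PySem.Int.toStr ini ++ " elefantes incomodam muita gente\n"))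
      ++ elefantes (n - 1) (ini + 1))
termination_by n.toNat
decreasing_by all_goals omega

-- ===== PORT B =====
-- ''.join(parts): exact — joining with the empty separator is plain left-to-right concatenation
def strConcat (parts : List String) : String := parts.foldl (· ++ ·) ""

-- 'incomodam ' * i : exact — Python string repetition ('' for i ≤ 0)
def incMany (i : Int) : String := strConcat (List.replicate i.toNat "incomodam ")

def elefantes_alt (n : Int) (ini : Int) : String :=
  if n < 1 then ""
  else
    strConcat ((PySem.List.pyRange ini (ini + n) 1).foldl
      (fun parts i =>
        if i == 1 then parts ++ ["Um elefante incomoda muita gente\n"]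
        else parts ++ [PySem.Int.toStr i ++ " elefantes " ++ incMany i ++ "muito mais\n",
                       PySem.Int.toStr i ++ " elefantes incomodam muita gente\n"])
      ([] : List String))

-- ===== PRECONDITION & SPEC =====
-- Pre_ excludes the inputs on which Python A raises RecursionError (its recursion depth is about
-- n + max(ini+n, 0) and the interpreter's limit is ~1000); the bound 950 is conservative, so a thin
-- band of deep inputs on which A still returns is excluded as well (see the cite in the claim).
def Pre_elefantes (n : Int) (ini : Int) : Prop := n < 1 ∨ n + max (ini + n) 0 ≤ 950
instance (n : Int) (ini : Int) : Decidable (Pre_elefantes n ini) := by unfold Pre_elefantes; infer_instance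

def pvWitness_elefantes : Int × Int := (3, 1)

def Spec_elefantes (n : Int) (ini : Int) (out : String) : Prop := out = elefantes_alt n ini
instance (n : Int) (ini : Int) (out : String) : Decidable (Spec_elefantes n ini out) := by unfold Spec_elefantes; infer_instance

-- ===== CLAIM (what is proved, stated in full; the proofs are below) =====
def Claim_equal_elefantes : Prop := ∀ (n : Int) (ini : Int), Dom_elefantes n ini → Pre_elefantes n ini → Spec_elefantes n ini (elefantes n ini)

-- ===== LEMMAS AND PROOFS =====

theorem strConcat_cons (x : String) (l : List String) :
    strConcat (x :: l) = x ++ strConcat l := by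
  have aux : ∀ (l : List String) (a : String), l.foldl (· ++ ·) a = a ++ l.foldl (· ++ ·) "" := by
    intro l
    induction l with
    | nil => intro a; simp [List.foldl, String.append_empty]
    | cons y ys ih =>
      intro a
      simp only [List.foldl]
      rw [ih (a ++ y), ih ("" ++ y)]
      simp [String.append_assoc, String.empty_append]
  simp only [strConcat, List.foldl]
  rw [aux l ("" ++ x)]
  simp [String.empty_append]

theorem strConcat_append (l₁ l₂ : List String) :
    strConcat (l₁ ++ l₂) = strConcat l₁ ++ strConcat l₂ := by
  induction l₁ with
  | nil => simp [strConcat, String.empty_append]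
  | cons x xs ih => simp [strConcat_cons, ih, String.append_assoc]

-- incMany unrolls one repetition for i ≥ 1
theorem incMany_succ (i : Int) (h : 1 ≤ i) :
    incMany i = "incomodam " ++ incMany (i - 1) := by
  have : i.toNat = (i - 1).toNat + 1 := by omega
  rw [incMany, this, List.replicate_succ, strConcat_cons]
  rfl

theorem incMany_nonpos (i : Int) (h : i < 1) : incMany i = "" := by
  have : i.toNat = 0 := by omega
  rw [incMany, this]
  rfl

-- A's helper called at default depth ini = 1, for arguments ≥ 2, is plain repetition
theorem incomodamA_ge_two (k : Nat) : ∀ (m j : Int), m.toNat = k → 2 ≤ j →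
    incomodamA m j = incMany m := by
  induction k with
  | zero =>
    intro m j hm hj
    have hm1 : m < 1 := by omega
    rw [incomodamA, if_pos hm1, incMany_nonpos m hm1]
  | succ k ih =>
    intro m j hm hj
    have hm1 : ¬ m < 1 := by omega
    have hj1 : (j == 1 && m == 1) = false := by
      have : j ≠ 1 := by omega
      simp [this]
    rw [incomodamA, if_neg hm1, hj1]
    simp only [Bool.false_eq_true, if_false]
    rw [ih (m - 1) (j + 1) (by omega) (by omega), incMany_succ m (by omega)]

-- A's helper at the top-level call incomodam(i)
theorem incomodamA_one (i : Int) : incomodamA i 1 = if i == 1 then "incomoda " else incMany i := by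
  by_cases h1 : i < 1
  · rw [incomodamA, if_pos h1, incMany_nonpos i h1]
    have : (i == 1) = false := by simp; omega
    rw [this]
    simp
  · by_cases he : i = 1
    · subst he
      rw [incomodamA]
      norm_num
      rw [incomodamA]
      norm_num [String.append_empty]
    · have hne : (i == 1) = false := by simp [he]
      rw [incomodamA, if_neg h1]
      have : ((1 : Int) == 1 && i == 1) = false := by simp [he]
      rw [this]
      simp only [Bool.false_eq_true, if_false, hne]
      norm_num
      rw [incomodamA_ge_two (i - 1).toNat (i - 1) 2 rfl (by omega), incMany_succ i (by omega)]

-- the one or two lines B emits for verse i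
def blockOf (i : Int) : List String :=
  if i == 1 then ["Um elefante incomoda muita gente\n"]
  else [PySem.Int.toStr i ++ " elefantes " ++ incMany i ++ "muito mais\n",
        PySem.Int.toStr i ++ " elefantes incomodam muita gente\n"]

theorem foldl_blocks (l : List Int) (acc : List String) :
    l.foldl (fun parts i =>
        if i == 1 then parts ++ ["Um elefante incomoda muita gente\n"]
        else parts ++ [PySem.Int.toStr i ++ " elefantes " ++ incMany i ++ "muito mais\n",
                       PySem.Int.toStr i ++ " elefantes incomodam muita gente\n"]) acc
      = acc ++ l.flatMap blockOf := by
  have : (fun (parts : List String) (i : Int) =>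
        if i == 1 then parts ++ ["Um elefante incomoda muita gente\n"]
        else parts ++ [PySem.Int.toStr i ++ " elefantes " ++ incMany i ++ "muito mais\n",
                       PySem.Int.toStr i ++ " elefantes incomodam muita gente\n"])
      = fun parts i => parts ++ blockOf i := by
    funext parts i
    unfold blockOf
    split <;> rfl
  rw [this, PySem.List.foldl_append_eq_flatMap]

theorem elefantes_eq_blocks (k : Nat) : ∀ (n ini : Int), n.toNat = k →
    elefantes n ini = strConcat ((PySem.List.pyRange ini (ini + n) 1).flatMap blockOf) := by
  induction k with
  | zero =>
    intro n ini hn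
    have hn1 : n < 1 := by omega
    rw [elefantes, if_pos hn1, PySem.List.pyRange_one_eq_nil (by omega)]
    rfl
  | succ k ih =>
    intro n ini hn
    have hn1 : ¬ n < 1 := by omega
    rw [PySem.List.pyRange_one_cons (by omega : ini < ini + n)]
    have harg : ini + 1 + (n - 1) = ini + n := by ring
    have hrest := ih (n - 1) (ini + 1) (by omega)
    rw [harg] at hrest
    rw [List.flatMap_cons, strConcat_append, ← hrest]
    rw [elefantes, if_neg hn1]
    by_cases he : ini = 1
    · subst he
      norm_num [incomodamA_one, blockOf, strConcat_cons]
      simp only [strConcat, List.foldl]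
      simp [String.append_empty]
    · have hne : (ini == 1) = false := by simp [he]
      rw [if_neg (by simp [he])]
      rw [incomodamA_one, hne]
      simp only [Bool.false_eq_true, if_false]
      unfold blockOf
      rw [hne]
      simp only [Bool.false_eq_true, if_false]
      rw [strConcat_cons, strConcat_cons]
      simp [strConcat, String.append_assoc, String.append_empty, String.empty_append]

-- ===== VERDICT (by name: the statement is the Claim_ definition above) =====
theorem elefantes_spec : Claim_equal_elefantes := by
  intro n ini _ _
  unfold Spec_elefantes elefantes_alt
  by_cases hn : n < 1
  · rw [if_pos hn, elefantes, if_pos hn]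
  · rw [if_neg hn, foldl_blocks, List.nil_append,
      elefantes_eq_blocks n.toNat n ini rfl]
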